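-- pv_equiv track=rewrite | github.com/nathandecaux/actiDep | actiDep/analysis/generate_report_v2.py | _count_clusters
-- ===== SOURCE A (Python) =====
-- def _count_clusters(sig_iterable):
--     cnt = 0
--     in_cluster = False
--     for v in list(sig_iterable):
--         if v and not in_cluster:
--             cnt += 1
--             in_cluster = True
--         elif not v and in_cluster:
--             in_cluster = False
--     return cnt
-- ===== SOURCE B (Python) =====
-- from itertools import groupby
--
-- def _count_clusters(sig_iterable):
--     return sum(1 for key, _ in groupby(sig_iterable, key=bool) if key)
-- ===== Notes on version B (the rewrite author's own statement) =====
-- stated objective: idiomatic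
-- what changed: Replaces the explicit in_cluster flag / transition-detection loop with itertools.groupby keyed on truthiness, counting the truthy runs directly.
import Mathlib
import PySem

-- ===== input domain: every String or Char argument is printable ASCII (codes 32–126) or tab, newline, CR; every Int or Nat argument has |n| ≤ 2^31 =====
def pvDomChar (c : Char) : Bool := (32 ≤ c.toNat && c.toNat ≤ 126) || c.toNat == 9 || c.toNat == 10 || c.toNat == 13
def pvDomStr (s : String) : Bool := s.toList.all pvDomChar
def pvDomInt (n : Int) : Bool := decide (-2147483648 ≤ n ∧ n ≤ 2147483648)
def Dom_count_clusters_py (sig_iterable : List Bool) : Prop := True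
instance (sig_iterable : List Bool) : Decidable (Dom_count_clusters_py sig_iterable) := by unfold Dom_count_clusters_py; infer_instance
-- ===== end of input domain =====

-- B replaces A's in_cluster transition flag by grouping the list into maximal runs and counting the truthy runs (idiomatic; same cost).

-- ===== PORT A =====
-- fold state: (cnt, in_cluster); branches in A's order
def count_clusters_py (sig_iterable : List Bool) : Int :=
  (sig_iterable.foldl
    (fun (st : Int × Bool) v =>
      if v && !st.2 then (st.1 + 1, true)
      else if !v && st.2 then (st.1, false)
      else st)
    (0, false)).1

-- ===== PORT B =====
-- groupby(key=bool): consume one maximal run at a time; count runs whose key is true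
def countTrueRuns : List Bool → Int
  | [] => 0
  | true :: rest => 1 + countTrueRuns (rest.dropWhile (· == true))
  | false :: rest => countTrueRuns (rest.dropWhile (· == false))
  termination_by l => l.length
  decreasing_by
    all_goals simp only [List.length_cons]
    · exact Nat.lt_succ_of_le (List.length_dropWhile_le _ _)
    · exact Nat.lt_succ_of_le (List.length_dropWhile_le _ _)

def count_clusters_py_alt (sig_iterable : List Bool) : Int :=
  countTrueRuns sig_iterable

-- ===== PRECONDITION & SPEC =====
def Spec_count_clusters_py (sig_iterable : List Bool) (out : Int) : Prop := out = count_clusters_py_alt sig_iterable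
instance (sig_iterable : List Bool) (out : Int) : Decidable (Spec_count_clusters_py sig_iterable out) := by unfold Spec_count_clusters_py; infer_instance

-- ===== CLAIM (what is proved, stated in full; the proofs are below) =====
def Claim_equal_count_clusters_py : Prop := ∀ (sig_iterable : List Bool), Dom_count_clusters_py sig_iterable → Spec_count_clusters_py sig_iterable (count_clusters_py sig_iterable)

-- ===== LEMMAS AND PROOFS =====

-- dropping a leading run of falses does not change the run count
lemma countTrueRuns_dropWhile_false (l : List Bool) :
    countTrueRuns (l.dropWhile (fun x => !x)) = countTrueRuns l := by
  cases l with
  | nil => rfl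
  | cons b rest =>
    cases b with
    | true => simp [List.dropWhile]
    | false => simp [List.dropWhile, countTrueRuns]

-- loop invariant: A's fold from state (cnt, b) counts cnt plus the runs of the
-- remaining list, with the current true-run already counted when b = true
lemma fold_eq_runs (l : List Bool) (cnt : Int) (b : Bool) :
    (l.foldl
      (fun (st : Int × Bool) v =>
        if v && !st.2 then (st.1 + 1, true)
        else if !v && st.2 then (st.1, false)
        else st)
      (cnt, b)).1
    = cnt + countTrueRuns (if b then l.dropWhile (· == true) else l) := by
  induction l generalizing cnt b with
  | nil => cases b <;> simp [countTrueRuns]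
  | cons v rest ih =>
    simp only [List.foldl_cons]
    cases v with
    | true =>
      cases b with
      | false =>
        refine (ih (cnt + 1) true).trans ?_
        simp [countTrueRuns]; ring
      | true =>
        refine (ih cnt true).trans ?_
        simp [List.dropWhile]
    | false =>
      cases b with
      | false =>
        refine (ih cnt false).trans ?_
        simp [countTrueRuns, countTrueRuns_dropWhile_false]
      | true =>
        refine (ih cnt false).trans ?_
        simp [List.dropWhile, countTrueRuns, countTrueRuns_dropWhile_false]

-- ===== VERDICT (by name: the statement is the Claim_ definition above) =====
theorem count_clusters_py_spec : Claim_equal_count_clusters_py := by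
  intro l _
  unfold Spec_count_clusters_py count_clusters_py count_clusters_py_alt
  rw [fold_eq_runs l 0 false]
  simp
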